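-- pv_equiv track=rewrite | github.com/Salvanim/Personal | Python/createCSVFrom2d.py | count_repeated_newlines
-- ===== SOURCE A (Python) =====
-- def count_repeated_newlines(text):
--     newline_counts = []
--
--     current_count = 0
--
--     for char in text:
--         if char == '\n':
--             current_count += 1
--         else:
--             if current_count > 0:
--                 newline_counts.append(current_count)
--             current_count = 0
--
--     if current_count > 0:
--         newline_counts.append(current_count)
--
--     return newline_counts
-- ===== SOURCE B (Python) =====
-- def _runs(chars):
--     # group consecutive equal characters (hand-rolled groupby), yielding (char, run_length)
--     it = iter(chars)
--     try:
--         key = next(it)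
--     except StopIteration:
--         return
--     n = 1
--     for c in it:
--         if c == key:
--             n += 1
--         else:
--             yield (key, n)
--             key, n = c, 1
--     yield (key, n)
--
-- def count_repeated_newlines(text):
--     return [n for k, n in _runs(text) if k == '\n']
-- ===== Notes on version B (the rewrite author's own statement) =====
-- stated objective: idiomatic
-- what changed: B groups consecutive equal characters in one pass (a groupby-style run-length grouping) and then keeps the lengths of the newline runs, removing A's current_count state machine and its post-loop flush branch.
import Mathlib
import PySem

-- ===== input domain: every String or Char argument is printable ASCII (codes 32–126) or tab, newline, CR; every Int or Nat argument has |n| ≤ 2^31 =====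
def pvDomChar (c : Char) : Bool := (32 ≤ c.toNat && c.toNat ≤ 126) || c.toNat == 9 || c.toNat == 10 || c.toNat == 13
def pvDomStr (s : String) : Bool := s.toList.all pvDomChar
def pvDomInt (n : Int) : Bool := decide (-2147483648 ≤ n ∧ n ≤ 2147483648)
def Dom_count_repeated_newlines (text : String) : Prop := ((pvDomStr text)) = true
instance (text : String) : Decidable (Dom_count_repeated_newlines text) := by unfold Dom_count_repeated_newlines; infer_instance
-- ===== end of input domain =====

-- B replaces A's current_count state machine (with its post-loop flush) by a single
-- groupby-style pass that groups consecutive equal characters and keeps the lengths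
-- of the newline runs (idiomatic group-then-filter decomposition; same O(n) cost).

-- ===== PORT A =====
-- the for-loop of A, state = (newline_counts, current_count); the [] case is the post-loop flush
def pvLoopA : List Char → List Int → Int → List Int
  | [], acc, cur => if cur > 0 then acc ++ [cur] else acc
  | c :: rest, acc, cur =>
      if c = '\n' then pvLoopA rest acc (cur + 1)
      else pvLoopA rest (if cur > 0 then acc ++ [cur] else acc) 0

def count_repeated_newlines (text : String) : List Int := pvLoopA text.toList [] 0

-- ===== PORT B =====
-- _runs' inner for-loop: state = (key, n, groups emitted so far); [] case is the final yield
def pvGloop : List Char → Char → Int → List (Char × Int) → List (Char × Int)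
  | [], k, n, acc => acc ++ [(k, n)]
  | c :: rest, k, n, acc =>
      if c = k then pvGloop rest k (n + 1) acc
      else pvGloop rest c 1 (acc ++ [(k, n)])

-- _runs: empty iterable yields nothing; otherwise the first char seeds (key, n) = (c, 1)
def pvRuns : List Char → List (Char × Int)
  | [] => []
  | c :: rest => pvGloop rest c 1 []

-- the list comprehension: keep lengths of the groups whose key is '\n'
def count_repeated_newlines_alt (text : String) : List Int :=
  ((pvRuns text.toList).filter (fun p => p.1 == '\n')).map Prod.snd

-- ===== PRECONDITION & SPEC =====
def Spec_count_repeated_newlines (text : String) (out : List Int) : Prop := out = count_repeated_newlines_alt text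
instance (text : String) (out : List Int) : Decidable (Spec_count_repeated_newlines text out) := by unfold Spec_count_repeated_newlines; infer_instance

-- ===== CLAIM (what is proved, stated in full; the proofs are below) =====
def Claim_equal_count_repeated_newlines : Prop := ∀ (text : String), Dom_count_repeated_newlines text → Spec_count_repeated_newlines text (count_repeated_newlines text)

-- ===== LEMMAS AND PROOFS =====

-- reference function: the run lengths of '\n' in cs, with cur pending newlines already seen
def pvSpecRuns : List Char → Int → List Int
  | [], cur => if cur > 0 then [cur] else []
  | c :: rest, cur =>
      if c = '\n' then pvSpecRuns rest (cur + 1)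
      else (if cur > 0 then [cur] else []) ++ pvSpecRuns rest 0

-- extract the newline-run lengths from a group list (B's comprehension)
def pvEx (l : List (Char × Int)) : List Int := (l.filter (fun p => p.1 == '\n')).map Prod.snd

theorem pvLoopA_eq_spec (cs : List Char) : ∀ (acc : List Int) (cur : Int),
    pvLoopA cs acc cur = acc ++ pvSpecRuns cs cur := by
  induction cs with
  | nil => intro acc cur; simp [pvLoopA, pvSpecRuns]; split <;> simp
  | cons c rest ih =>
      intro acc cur
      simp only [pvLoopA, pvSpecRuns]
      split
      · exact ih acc (cur + 1)
      · rw [ih]; split <;> simp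

theorem pvEx_append (l : List (Char × Int)) (k : Char) (n : Int) :
    pvEx (l ++ [(k, n)]) = pvEx l ++ (if k = '\n' then [n] else []) := by
  simp [pvEx, List.filter_append]
  split <;> simp_all

theorem pvGloop_eq_spec (rest : List Char) : ∀ (k : Char) (n : Int) (acc : List (Char × Int)),
    (k = '\n' → 0 < n) →
    pvEx (pvGloop rest k n acc) = pvEx acc ++ pvSpecRuns rest (if k = '\n' then n else 0) := by
  induction rest with
  | nil =>
      intro k n acc hk
      simp only [pvGloop, pvEx_append, pvSpecRuns]
      by_cases h : k = '\n'
      · simp [h, hk h]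
      · simp [h]
  | cons c rest ih =>
      intro k n acc hk
      simp only [pvGloop]
      by_cases hck : c = k
      · subst hck
        rw [if_pos rfl, ih c (n + 1) acc (fun h => by have := hk h; omega)]
        by_cases h : c = '\n'
        · simp [pvSpecRuns, h]
        · simp [pvSpecRuns, h]
      · simp only [if_neg hck]
        rw [ih c 1 (acc ++ [(k, n)]) (fun _ => by omega), pvEx_append]
        by_cases hk' : k = '\n'
        · by_cases hc : c = '\n'
          · exact absurd (hc.trans hk'.symm) hck
          · simp [pvSpecRuns, hk', hc, hk hk']
        · by_cases hc : c = '\n' <;> simp [pvSpecRuns, hk', hc]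

theorem alt_eq_spec (cs : List Char) :
    ((pvRuns cs).filter (fun p => p.1 == '\n')).map Prod.snd = pvSpecRuns cs 0 := by
  cases cs with
  | nil => simp [pvRuns, pvSpecRuns]
  | cons c rest =>
      have h := pvGloop_eq_spec rest c 1 [] (fun _ => by omega)
      simp only [pvEx, List.filter_nil, List.map_nil, List.nil_append] at h
      by_cases hc : c = '\n' <;> simp [pvRuns, pvSpecRuns, hc] at h ⊢ <;> exact h

-- ===== VERDICT (by name: the statement is the Claim_ definition above) =====
theorem count_repeated_newlines_spec : Claim_equal_count_repeated_newlines := by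
  intro text _
  unfold Spec_count_repeated_newlines count_repeated_newlines count_repeated_newlines_alt
  rw [pvLoopA_eq_spec, alt_eq_spec]
  simp
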